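-- pv_equiv track=rewrite | github.com/111userNotFound111/Gaming | HackerRank/canva/Message_Delivery_System.py | message_delivery_system
-- ===== SOURCE A (Python) =====
-- def message_delivery_system(n,k,timestamps_list, messages_list):
--     buffer_dict = {}
--     delivered_list = []
--     for i in range (0,n):
--         cur_time = int(timestamps_list[i])
--         cur_msg = messages_list[i]
--
--         if cur_msg not in buffer_dict.keys():
--             buffer_dict[cur_msg] = cur_time + k
--             delivered_list.append('true')
--         else:
--             expire_time = buffer_dict[cur_msg]
--             if cur_time <= expire_time:
--                 delivered_list.append('false')
--             else:
--                 buffer_dict[cur_msg] = cur_time + k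
--                 delivered_list.append('true')
--
--     return delivered_list
-- ===== SOURCE B (Python) =====
-- def message_delivery_system(n, k, timestamps_list, messages_list):
--     # index-then-scatter: group positions by message, then walk each group
--     # independently with a local expiry, writing into a preallocated result
--     groups = {}
--     for i in range(n):
--         groups.setdefault(messages_list[i], []).append(i)
--     result = ['false'] * max(n, 0)
--     for positions in groups.values():
--         expire = None
--         for i in positions:
--             t = int(timestamps_list[i])
--             if expire is None or t > expire:
--                 expire = t + k
--                 result[i] = 'true'
--     return result
-- ===== Notes on version B (the rewrite author's own statement) =====
-- stated objective: alternative
-- what changed: Replaces A's single stateful scan over a live per-message expiry dict with an index-then-scatter scheme: one pass groups the positions of each message, then every group is walked independently with a local expiry variable, scattering 'true' verdicts into a result list preallocated with 'false'.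
import Mathlib
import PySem

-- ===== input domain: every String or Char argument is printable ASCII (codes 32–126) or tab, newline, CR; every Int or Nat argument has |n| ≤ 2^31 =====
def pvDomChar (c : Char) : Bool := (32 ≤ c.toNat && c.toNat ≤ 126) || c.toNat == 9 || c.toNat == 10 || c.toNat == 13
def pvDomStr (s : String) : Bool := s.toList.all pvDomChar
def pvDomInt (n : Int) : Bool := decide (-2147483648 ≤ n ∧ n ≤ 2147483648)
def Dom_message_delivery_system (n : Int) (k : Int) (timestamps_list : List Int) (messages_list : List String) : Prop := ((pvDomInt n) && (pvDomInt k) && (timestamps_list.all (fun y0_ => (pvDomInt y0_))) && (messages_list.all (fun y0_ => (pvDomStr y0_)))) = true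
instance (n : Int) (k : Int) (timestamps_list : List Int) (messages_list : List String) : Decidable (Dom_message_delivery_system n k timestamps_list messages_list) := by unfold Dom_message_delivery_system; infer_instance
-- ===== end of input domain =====

-- B replaces A's single stateful scan over a live expiry dict by an index-then-scatter pass:
-- group positions by message once, then walk each group independently with a local expiry,
-- writing verdicts into a preallocated result (objective: alternative; return value only, no mutation).

-- ===== PORT A =====
-- the loop body of A (dict of expiry times, delivered list), one step per index i
def mdsStepA (k : Int) (ts : List Int) (ms : List String)
    (st : PySem.Dict String Int × List String) (i : Int) : PySem.Dict String Int × List String :=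
  let cur_time := PySem.List.pyGetD ts i 0
  let cur_msg := PySem.List.pyGetD ms i ""
  if st.1.contains cur_msg = false then
    (st.1.insert cur_msg (cur_time + k), st.2 ++ ["true"])
  else
    let expire_time := st.1.getD cur_msg 0
    if cur_time ≤ expire_time then (st.1, st.2 ++ ["false"])
    else (st.1.insert cur_msg (cur_time + k), st.2 ++ ["true"])

def message_delivery_system (n : Int) (k : Int) (timestamps_list : List Int) (messages_list : List String) : List String :=
  ((PySem.List.pyRange 0 n 1).foldl (mdsStepA k timestamps_list messages_list)
    ((PySem.Dict.empty : PySem.Dict String Int), ([] : List String))).2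

-- ===== PORT B =====
-- groups.setdefault(messages_list[i], []).append(i)
def mdsStepG (ms : List String) (g : PySem.Dict String (List Int)) (i : Int) : PySem.Dict String (List Int) :=
  g.modify (PySem.List.pyGetD ms i "") [] (fun l => l ++ [i])

-- the inner loop of B: local expiry (None = Option.none) plus the result list being written
def mdsStepI (k : Int) (ts : List Int) (st : Option Int × List String) (i : Int) : Option Int × List String :=
  let t := PySem.List.pyGetD ts i 0
  match st.1 with
  | none => (some (t + k), PySem.List.pySetD st.2 i "true")
  | some e => if e < t then (some (t + k), PySem.List.pySetD st.2 i "true") else st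

def message_delivery_system_alt (n : Int) (k : Int) (timestamps_list : List Int) (messages_list : List String) : List String :=
  let groups := (PySem.List.pyRange 0 n 1).foldl (mdsStepG messages_list)
    (PySem.Dict.empty : PySem.Dict String (List Int))
  groups.values.foldl
    (fun r positions => (positions.foldl (mdsStepI k timestamps_list) (none, r)).2)
    (List.replicate n.toNat "false")

-- ===== PRECONDITION & SPEC =====
-- Pre_ excludes exactly the inputs where Python A raises IndexError: n larger than a list's length.
def Pre_message_delivery_system (n : Int) (k : Int) (timestamps_list : List Int) (messages_list : List String) : Prop :=
  n ≤ (timestamps_list.length : Int) ∧ n ≤ (messages_list.length : Int)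
instance (n : Int) (k : Int) (timestamps_list : List Int) (messages_list : List String) : Decidable (Pre_message_delivery_system n k timestamps_list messages_list) := by unfold Pre_message_delivery_system; infer_instance
def pvWitness_message_delivery_system : Int × Int × List Int × List String := (3, 4, [1, 2, 10], ["a", "a", "a"])

def Spec_message_delivery_system (n : Int) (k : Int) (timestamps_list : List Int) (messages_list : List String) (out : List String) : Prop := out = message_delivery_system_alt n k timestamps_list messages_list
instance (n : Int) (k : Int) (timestamps_list : List Int) (messages_list : List String) (out : List String) : Decidable (Spec_message_delivery_system n k timestamps_list messages_list out) := by unfold Spec_message_delivery_system; infer_instance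

-- ===== CLAIM (what is proved, stated in full; the proofs are below) =====
def Claim_equal_message_delivery_system : Prop := ∀ (n : Int) (k : Int) (timestamps_list : List Int) (messages_list : List String), Dom_message_delivery_system n k timestamps_list messages_list → Pre_message_delivery_system n k timestamps_list messages_list → Spec_message_delivery_system n k timestamps_list messages_list (message_delivery_system n k timestamps_list messages_list)

-- ===== LEMMAS AND PROOFS =====

-- the common specification both programs are reduced to:
-- the expiry state after a list of occurrence indices, and the verdict it induces
def expStep (k : Int) (ts : List Int) (e : Option Int) (i : Int) : Option Int :=
  match e with
  | none => some (PySem.List.pyGetD ts i 0 + k)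
  | some ev => if ev < PySem.List.pyGetD ts i 0 then some (PySem.List.pyGetD ts i 0 + k) else some ev

def expireOf (k : Int) (ts : List Int) (l : List Int) : Option Int := l.foldl (expStep k ts) none

def vb (ts : List Int) (e : Option Int) (i : Int) : Bool :=
  match e with
  | none => true
  | some ev => decide (ev < PySem.List.pyGetD ts i 0)

def verd (k : Int) (ts : List Int) (l : List Int) (i : Int) : String :=
  if vb ts (expireOf k ts l) i then "true" else "false"

-- the indices 0..m-1 as integers, and the occurrence positions of message s among them
def idxs (m : Nat) : List Int := (List.range m).map (Nat.cast : Nat → Int)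

def occ (ms : List String) (m : Nat) (s : String) : List Int :=
  (idxs m).filter (fun i => PySem.List.pyGetD ms i "" == s)

def specOut (k : Int) (ts : List Int) (ms : List String) : Nat → List String
  | 0 => []
  | m + 1 => specOut k ts ms m ++ [verd k ts (occ ms m (PySem.List.pyGetD ms (m : Int) "")) (m : Int)]

lemma idxs_succ (m : Nat) : idxs (m + 1) = idxs m ++ [(m : Int)] := by
  simp [idxs, List.range_succ]

lemma mem_idxs {m : Nat} {i : Int} : i ∈ idxs m ↔ 0 ≤ i ∧ i < (m : Int) := by
  simp [idxs]
  constructor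
  · rintro ⟨j, hj, rfl⟩; omega
  · intro h; exact ⟨i.toNat, by omega, by omega⟩

lemma occ_succ (ms : List String) (m : Nat) (s : String) :
    occ ms (m + 1) s = occ ms m s ++ (if PySem.List.pyGetD ms (m : Int) "" == s then [(m : Int)] else []) := by
  simp [occ, idxs_succ, List.filter_append]
  split <;> simp_all

lemma expireOf_append_singleton (k : Int) (ts : List Int) (l : List Int) (i : Int) :
    expireOf k ts (l ++ [i]) = expStep k ts (expireOf k ts l) i := by
  simp [expireOf, List.foldl_append]

lemma mem_occ {ms : List String} {m : Nat} {s : String} {i : Int} :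
    i ∈ occ ms m s ↔ (0 ≤ i ∧ i < (m : Int) ∧ PySem.List.pyGetD ms i "" = s) := by
  simp [occ, mem_idxs, and_assoc]

lemma pyRange_eq_idxs (n : Int) : PySem.List.pyRange 0 n 1 = idxs n.toNat := by
  rw [PySem.List.pyRange_one, idxs, sub_zero]
  exact List.map_congr_left (fun x _ => zero_add (x : Int))

-- ===== A-side: the fold over range(n) computes specOut =====

def AF (k : Int) (ts : List Int) (ms : List String) (m : Nat) : PySem.Dict String Int × List String :=
  (idxs m).foldl (mdsStepA k ts ms) ((PySem.Dict.empty : PySem.Dict String Int), ([] : List String))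

lemma AF_succ (k : Int) (ts : List Int) (ms : List String) (m : Nat) :
    AF k ts ms (m + 1) = mdsStepA k ts ms (AF k ts ms m) (m : Int) := by
  rw [AF, idxs_succ, List.foldl_append, List.foldl_cons, List.foldl_nil, AF]

lemma AF_dict (k : Int) (ts : List Int) (ms : List String) (m : Nat) (s : String) :
    (AF k ts ms m).1.get? s = expireOf k ts (occ ms m s) := by
  induction m with
  | zero => simp [AF, idxs, occ, expireOf, PySem.Dict.get?_empty]
  | succ m ih =>
    rw [AF_succ, occ_succ]
    simp only [mdsStepA, PySem.Dict.contains_eq_isSome_get?]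
    by_cases hs : PySem.List.pyGetD ms (m : Int) "" = s
    · subst hs
      simp only [beq_self_eq_true, if_pos, expireOf_append_singleton, ← ih]
      rcases h : (AF k ts ms m).1.get? (PySem.List.pyGetD ms (m : Int) "") with _ | e
      · simp [PySem.Dict.get?_insert_self, expStep]
      · have hD : (AF k ts ms m).1.getD (PySem.List.pyGetD ms (m : Int) "") 0 = e := by
          rw [PySem.Dict.getD_eq_get?_getD, h]; rfl
        rw [if_neg (by simp)]
        simp only [hD, expStep]
        split_ifs with hle hlt
        · omega
        · simpa using h
        · simp [PySem.Dict.get?_insert_self]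
        · omega
    · have hb : (PySem.List.pyGetD ms (m : Int) "" == s) = false := by simpa using hs
      have hne : s ≠ PySem.List.pyGetD ms (m : Int) "" := fun h => hs h.symm
      have hins : ∀ v, ((AF k ts ms m).1.insert (PySem.List.pyGetD ms (m : Int) "") v).get? s
          = (AF k ts ms m).1.get? s := fun v => PySem.Dict.get?_insert_of_ne _ v hne
      simp only [hb, Bool.false_eq_true, if_false, List.append_nil, ← ih]
      split_ifs <;> first | rfl | exact hins _

lemma AF_out (k : Int) (ts : List Int) (ms : List String) (m : Nat) :
    (AF k ts ms m).2 = specOut k ts ms m := by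
  induction m with
  | zero => simp [AF, idxs, specOut]
  | succ m ih =>
    rw [AF_succ, specOut, ← ih, verd]
    have hd := AF_dict k ts ms m (PySem.List.pyGetD ms (m : Int) "")
    simp only [mdsStepA, PySem.Dict.contains_eq_isSome_get?]
    rcases h : (AF k ts ms m).1.get? (PySem.List.pyGetD ms (m : Int) "") with _ | e
    · rw [h] at hd
      rw [← hd]
      simp [vb]
    · rw [h] at hd
      have hD : (AF k ts ms m).1.getD (PySem.List.pyGetD ms (m : Int) "") 0 = e := by
        rw [PySem.Dict.getD_eq_get?_getD, h]; rfl
      rw [if_neg (by simp)]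
      rw [← hd]
      simp only [hD, vb]
      split_ifs with hle hv hv2
      · simp only [decide_eq_true_eq] at hv; omega
      · rfl
      · rfl
      · simp only [decide_eq_true_eq] at hv2; omega

lemma A_eq_spec (n k : Int) (ts : List Int) (ms : List String) :
    message_delivery_system n k ts ms = specOut k ts ms n.toNat := by
  rw [message_delivery_system, ← AF_out k ts ms n.toNat, AF, pyRange_eq_idxs]

-- ===== B-side: groups, inner scatter, outer fold =====

def GD (ms : List String) (m : Nat) : PySem.Dict String (List Int) :=
  (idxs m).foldl (mdsStepG ms) (PySem.Dict.empty : PySem.Dict String (List Int))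

lemma GD_getD (ms : List String) (m : Nat) (s : String) :
    (GD ms m).getD s [] = occ ms m s := by
  induction m with
  | zero => simp [GD, idxs, occ, PySem.Dict.getD_empty]
  | succ m ih =>
    have hstep : GD ms (m + 1) = mdsStepG ms (GD ms m) (m : Int) := by
      rw [GD, idxs_succ, List.foldl_append, List.foldl_cons, List.foldl_nil, GD]
    rw [hstep, occ_succ, mdsStepG, PySem.Dict.getD_modify]
    by_cases hs : s = PySem.List.pyGetD ms (m : Int) ""
    · rw [if_pos hs, ← hs, ih]
      simp
    · rw [if_neg hs, ih]
      have hb : (PySem.List.pyGetD ms (m : Int) "" == s) = false := by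
        simp only [beq_eq_false_iff_ne, ne_eq]
        exact fun hh => hs hh.symm
      simp only [hb, Bool.false_eq_true, if_false, List.append_nil]

lemma GD_keys_nodup (ms : List String) (m : Nat) : (GD ms m).keys.Nodup := by
  exact PySem.Dict.nodup_keys_foldl_modify_key (idxs m) (fun i => PySem.List.pyGetD ms i "") []
    (fun _ i => fun l => l ++ [i]) _ (by simp [PySem.Dict.keys_empty])

lemma GD_mem_keys (ms : List String) (m : Nat) (s : String) :
    s ∈ (GD ms m).keys ↔ s ∈ (idxs m).map (fun i => PySem.List.pyGetD ms i "") := by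
  have h2 : (List.foldl (mdsStepG ms) PySem.Dict.empty (idxs m)).keys
      = PySem.Set.update ((PySem.Dict.empty : PySem.Dict String (List Int)).keys)
          ((idxs m).map (fun i => PySem.List.pyGetD ms i "")) :=
    PySem.Dict.keys_foldl_modify_key (idxs m) (fun i => PySem.List.pyGetD ms i "")
      ([] : List Int) (fun _ i l => l ++ [i]) PySem.Dict.empty
  rw [GD, h2, PySem.Dict.keys_empty, PySem.Set.update_nil_left, PySem.Set.mem_ofList]

lemma stepI_none (k : Int) (ts : List Int) (r : List String) (i : Int) :
    mdsStepI k ts (none, r) i = (some (PySem.List.pyGetD ts i 0 + k), PySem.List.pySetD r i "true") := rfl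

lemma stepI_some (k : Int) (ts : List Int) (e : Int) (r : List String) (i : Int) :
    mdsStepI k ts (some e, r) i =
      if e < PySem.List.pyGetD ts i 0 then (some (PySem.List.pyGetD ts i 0 + k), PySem.List.pySetD r i "true")
      else (some e, r) := rfl

lemma expStep_none (k : Int) (ts : List Int) (i : Int) :
    expStep k ts none i = some (PySem.List.pyGetD ts i 0 + k) := rfl

lemma expStep_some (k : Int) (ts : List Int) (e : Int) (i : Int) :
    expStep k ts (some e) i =
      if e < PySem.List.pyGetD ts i 0 then some (PySem.List.pyGetD ts i 0 + k) else some e := rfl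

lemma inner_fst (k : Int) (ts : List Int) (ps : List Int) (e0 : Option Int) (r : List String) :
    (ps.foldl (mdsStepI k ts) (e0, r)).1 = ps.foldl (expStep k ts) e0 := by
  induction ps generalizing e0 r with
  | nil => rfl
  | cons i ps ih =>
    rcases e0 with _ | e
    · rw [List.foldl_cons, List.foldl_cons, stepI_none, expStep_none]
      exact ih _ _
    · rw [List.foldl_cons, List.foldl_cons, stepI_some, expStep_some]
      split_ifs <;> exact ih _ _

lemma inner_len (k : Int) (ts : List Int) (ps : List Int) (e0 : Option Int) (r : List String) :
    ((ps.foldl (mdsStepI k ts) (e0, r)).2).length = r.length := by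
  induction ps generalizing e0 r with
  | nil => rfl
  | cons i ps ih =>
    rcases e0 with _ | e
    · rw [List.foldl_cons, stepI_none, ih, PySem.List.length_pySetD]
    · rw [List.foldl_cons, stepI_some]
      split_ifs
      · rw [ih, PySem.List.length_pySetD]
      · exact ih _ _

lemma inner_get_notmem (k : Int) (ts : List Int) (ps : List Int) (e0 : Option Int) (r : List String)
    (j : Nat) (hj : (j : Int) ∉ ps) (hpos : ∀ i ∈ ps, 0 ≤ i) :
    ((ps.foldl (mdsStepI k ts) (e0, r)).2)[j]? = r[j]? := by
  induction ps generalizing e0 r with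
  | nil => rfl
  | cons i ps ih =>
    have hj' : (j : Int) ∉ ps := fun h => hj (List.mem_cons_of_mem _ h)
    have hpos' : ∀ i ∈ ps, 0 ≤ i := fun i hi => hpos i (List.mem_cons_of_mem _ hi)
    have hne : i ≠ (j : Int) := fun h => hj (h ▸ List.mem_cons_self)
    have hpi : 0 ≤ i := hpos i List.mem_cons_self
    have hset : (PySem.List.pySetD r i "true")[j]? = r[j]? := by
      rw [PySem.List.pySetD_of_nonneg _ _ hpi]
      exact List.getElem?_set_ne (by omega)
    rcases e0 with _ | e
    · rw [List.foldl_cons, stepI_none, ih _ _ hj' hpos', hset]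
    · rw [List.foldl_cons, stepI_some]
      split_ifs
      · rw [ih _ _ hj' hpos', hset]
      · exact ih _ _ hj' hpos'

lemma inner_get_mem (k : Int) (ts : List Int) (l1 l2 : List Int) (r : List String) (j : Nat)
    (h2 : (j : Int) ∉ l2) (hpos2 : ∀ i ∈ l2, 0 ≤ i) (hj : j < r.length) :
    (((l1 ++ (j : Int) :: l2).foldl (mdsStepI k ts) (none, r)).2)[j]? =
      if vb ts (expireOf k ts l1) (j : Int) then some "true" else ((l1.foldl (mdsStepI k ts) (none, r)).2)[j]? := by
  rw [List.foldl_append, List.foldl_cons]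
  rcases hst : l1.foldl (mdsStepI k ts) (none, r) with ⟨e1, r1⟩
  have he1 : e1 = expireOf k ts l1 := by
    have := inner_fst k ts l1 none r; rw [hst] at this; exact this
  have hr1len : r1.length = r.length := by
    have := inner_len k ts l1 none r; rw [hst] at this; exact this
  have hset : (PySem.List.pySetD r1 (j : Int) "true")[j]? = some "true" := by
    rw [PySem.List.pySetD_of_nonneg _ _ (by omega)]
    simp only [Int.toNat_natCast]
    exact List.getElem?_set_self (by omega)
  simp only [mdsStepI, he1, vb]
  rcases expireOf k ts l1 with _ | e
  · simp only [if_pos]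
    rw [inner_get_notmem k ts l2 _ _ j h2 hpos2, hset]
  · simp only [decide_eq_true_eq]
    split_ifs with hlt
    · rw [inner_get_notmem k ts l2 _ _ j h2 hpos2, hset]
    · exact inner_get_notmem k ts l2 _ _ j h2 hpos2

-- decomposition of a group's occurrence list around j
lemma occ_decomp (ms : List String) (m j : Nat) (s : String) (hjm : j < m)
    (hs : PySem.List.pyGetD ms (j : Int) "" = s) :
    ∃ l2, occ ms m s = occ ms j s ++ (j : Int) :: l2 ∧ (∀ i ∈ l2, (j : Int) < i) := by
  obtain ⟨d, rfl⟩ : ∃ d, m = j + (d + 1) := ⟨m - j - 1, by omega⟩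
  have hidx : idxs (j + (d + 1)) =
      idxs j ++ ((j : Int) :: (List.range d).map (fun t => ((j + t + 1 : Nat) : Int))) := by
    rw [idxs, idxs, List.range_add, List.map_append]
    congr 1
    rw [List.range_succ_eq_map, List.map_cons, List.map_cons, List.map_map, List.map_map]
    congr 1
  refine ⟨((List.range d).map (fun t => ((j + t + 1 : Nat) : Int))).filter
      (fun i => PySem.List.pyGetD ms i "" == s), ?_, ?_⟩
  · rw [occ, hidx, List.filter_append, List.filter_cons_of_pos (by simp [hs])]
    rfl
  · intro i hi
    rcases List.mem_filter.1 hi with ⟨hmem, _⟩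
    rcases List.mem_map.1 hmem with ⟨t, _, rfl⟩
    push_cast
    omega

lemma occ_lt (ms : List String) (j : Nat) (s : String) : ∀ i ∈ occ ms j s, i < (j : Int) := by
  intro i hi; exact (mem_occ.1 hi).2.1

lemma occ_pos (ms : List String) (j : Nat) (s : String) : ∀ i ∈ occ ms j s, 0 ≤ i := by
  intro i hi; exact (mem_occ.1 hi).1

-- outer fold over the groups, element by element
lemma outer_get (k : Int) (ts : List Int) (ms : List String) (m : Nat) (ks : List String)
    (r : List String) (hrlen : r.length = m) (j : Nat) (hjm : j < m) :
    ((ks.map (fun s => occ ms m s)).foldl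
        (fun r ps => (ps.foldl (mdsStepI k ts) (none, r)).2) r)[j]? =
      if PySem.List.pyGetD ms (j : Int) "" ∈ ks then
        (if vb ts (expireOf k ts (occ ms j (PySem.List.pyGetD ms (j : Int) ""))) (j : Int)
          then some "true" else r[j]?)
      else r[j]? := by
  induction ks generalizing r with
  | nil => simp
  | cons s ks ih =>
    simp only [List.map_cons, List.foldl_cons]
    have hstep_len : ((occ ms m s).foldl (mdsStepI k ts) (none, r)).2.length = m := by
      rw [inner_len]; exact hrlen
    by_cases hsj : PySem.List.pyGetD ms (j : Int) "" = s
    · -- j belongs to this group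
      obtain ⟨l2, hdec, hl2⟩ := occ_decomp ms m j s hjm hsj
      have h2 : (j : Int) ∉ l2 := fun h => by have := hl2 _ h; omega
      have hpos2 : ∀ i ∈ l2, 0 ≤ i := fun i h => by have := hl2 _ h; omega
      have hstep : ((occ ms m s).foldl (mdsStepI k ts) (none, r)).2[j]? =
          if vb ts (expireOf k ts (occ ms j s)) (j : Int) then some "true" else r[j]? := by
        rw [hdec, inner_get_mem k ts _ l2 r j h2 hpos2 (by omega)]
        congr 1
        exact inner_get_notmem k ts (occ ms j s) none r j
          (fun h => by have := occ_lt ms j s _ h; omega) (occ_pos ms j s)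
      rw [ih _ hstep_len]
      by_cases hmem : PySem.List.pyGetD ms (j : Int) "" ∈ ks <;>
        simp only [hsj, List.mem_cons, true_or, if_pos, hstep] <;>
        split_ifs <;> simp_all
    · -- j is not in this group
      have hnot : (j : Int) ∉ occ ms m s := fun h => hsj (mem_occ.1 h).2.2
      have hstep : ((occ ms m s).foldl (mdsStepI k ts) (none, r)).2[j]? = r[j]? :=
        inner_get_notmem k ts _ none r j hnot (occ_pos ms m s)
      rw [ih _ hstep_len, hstep]
      have hmemiff : (PySem.List.pyGetD ms (j : Int) "" ∈ s :: ks) ↔ (PySem.List.pyGetD ms (j : Int) "" ∈ ks) := by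
        rw [List.mem_cons]; exact or_iff_right hsj
      simp only [hmemiff]

lemma outer_len (k : Int) (ts : List Int) (gs : List (List Int)) (r : List String) :
    (gs.foldl (fun r ps => (ps.foldl (mdsStepI k ts) (none, r)).2) r).length = r.length := by
  induction gs generalizing r with
  | nil => rfl
  | cons ps gs ih => simp only [List.foldl_cons]; rw [ih, inner_len]

lemma specOut_len (k : Int) (ts : List Int) (ms : List String) (m : Nat) :
    (specOut k ts ms m).length = m := by
  induction m with
  | zero => rfl
  | succ m ih => simp [specOut, ih]

lemma specOut_get (k : Int) (ts : List Int) (ms : List String) (m j : Nat) (hj : j < m) :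
    (specOut k ts ms m)[j]? =
      some (verd k ts (occ ms j (PySem.List.pyGetD ms (j : Int) "")) (j : Int)) := by
  induction m with
  | zero => omega
  | succ m ih =>
    rw [specOut]
    rcases Nat.lt_or_ge j m with h | h
    · rw [List.getElem?_append_left (by rw [specOut_len]; omega)]
      exact ih h
    · have hjm : j = m := by omega
      subst hjm
      rw [List.getElem?_append_right (by rw [specOut_len])]
      simp [specOut_len]

lemma B_eq_spec (n k : Int) (ts : List Int) (ms : List String) :
    message_delivery_system_alt n k ts ms = specOut k ts ms n.toNat := by
  rw [message_delivery_system_alt]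
  have hR : PySem.List.pyRange 0 n 1 = idxs n.toNat := by
    rw [PySem.List.pyRange_one, idxs]; simp
  rw [hR]
  have hGD : (idxs n.toNat).foldl (mdsStepG ms) (PySem.Dict.empty : PySem.Dict String (List Int)) = GD ms n.toNat := rfl
  rw [hGD]
  have hvals : (GD ms n.toNat).values = (GD ms n.toNat).keys.map (fun s => occ ms n.toNat s) := by
    rw [PySem.Dict.values_eq_map_keys _ (GD_keys_nodup ms n.toNat) []]
    exact List.map_congr_left (fun s _ => GD_getD ms n.toNat s)
  rw [hvals]
  apply List.ext_getElem?
  intro j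
  rcases Nat.lt_or_ge j n.toNat with hj | hj
  · rw [outer_get k ts ms n.toNat _ _ (by simp) j hj, specOut_get k ts ms n.toNat j hj]
    have hmem : PySem.List.pyGetD ms (j : Int) "" ∈ (GD ms n.toNat).keys := by
      rw [GD_mem_keys]
      exact List.mem_map.2 ⟨(j : Int), mem_idxs.2 (by omega), rfl⟩
    rw [if_pos hmem, verd]
    split_ifs
    · rfl
    · rw [List.getElem?_replicate]
      simp [hj]
  · have hlen : ((((GD ms n.toNat).keys.map (fun s => occ ms n.toNat s))).foldl
        (fun r ps => (ps.foldl (mdsStepI k ts) (none, r)).2) (List.replicate n.toNat "false")).length = n.toNat := by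
      rw [outer_len]; simp
    rw [List.getElem?_eq_none (by omega), List.getElem?_eq_none (by rw [specOut_len]; omega)]

-- ===== VERDICT (by name: the statement is the Claim_ definition above) =====
theorem message_delivery_system_spec : Claim_equal_message_delivery_system := by
  intro n k ts ms _ _
  unfold Spec_message_delivery_system
  rw [A_eq_spec, B_eq_spec]
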